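-- pv_equiv track=rewrite | github.com/arvos-dev/arvos-py | python_calls.py | find_repeating_sequence
-- ===== SOURCE A (Python) =====
-- def find_repeating_sequence(seq):
--     guess = 0
--     max_len = len(seq) // 2
--     for i in range(len(seq)):
--         for x in range(2, max_len):
--             if seq[0+i:x+i] == seq[x+i:2*x+i] :
--                 return (i, x)
--
--     return len(seq), guess
-- ===== SOURCE B (Python) =====
-- def find_repeating_sequence(seq):
--     # Different algorithm: precompute, for each gap g, the diagonal run-lengths
--     # lcp(i, i+g) in one backward pass, then scan (i, x) testing block equality in O(1).
--     n = len(seq)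
--     max_len = n // 2
--     diags = []
--     for g in range(2, max_len):
--         rev = [0]
--         for i in range(n - g - 1, -1, -1):
--             rev.append(rev[-1] + 1 if seq[i] == seq[i + g] else 0)
--         diags.append(rev[::-1])
--     for i in range(n):
--         for x in range(2, max_len):
--             if i + 2 * x <= n and diags[x - 2][i] >= x:
--                 return (i, x)
--     return n, 0
-- ===== Notes on version B (the rewrite author's own statement) =====
-- stated objective: faster
-- what changed: Instead of comparing the two candidate blocks by slicing (O(x) per (i,x) pair, O(n^3) total), B precomputes for every gap g the diagonal common-run lengths lcp(i,i+g) in one backward pass per gap, so each block-equality test becomes an O(1) table lookup.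
import Mathlib
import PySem

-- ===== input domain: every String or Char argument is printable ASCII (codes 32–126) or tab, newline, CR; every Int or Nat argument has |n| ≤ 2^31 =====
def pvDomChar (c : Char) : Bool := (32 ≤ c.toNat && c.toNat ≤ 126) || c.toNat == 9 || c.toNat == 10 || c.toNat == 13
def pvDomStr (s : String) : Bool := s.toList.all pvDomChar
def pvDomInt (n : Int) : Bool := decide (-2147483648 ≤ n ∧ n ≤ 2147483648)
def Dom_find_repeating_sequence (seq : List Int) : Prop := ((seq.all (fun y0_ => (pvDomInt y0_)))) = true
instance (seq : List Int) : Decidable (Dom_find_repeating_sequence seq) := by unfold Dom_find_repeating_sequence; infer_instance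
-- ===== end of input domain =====

-- B replaces A's per-pair slice comparison by precomputed per-gap diagonal run-lengths
-- (lcp(i,i+g)), turning each block-equality test into an O(1) lookup; same scan order,
-- same result everywhere (both are total).


-- ===== PORT A =====
-- inner `for x in range(2, max_len)`: r = remaining iterations, x = current value
def aInner (seq : List Int) (i : Nat) : Nat → Nat → Option (Int × Int)
  | 0, _ => none
  | r + 1, x =>
    if PySem.List.slice seq (some ((0 + i : Nat) : Int)) (some ((x + i : Nat) : Int)) =
       PySem.List.slice seq (some ((x + i : Nat) : Int)) (some ((2 * x + i : Nat) : Int)) then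
      some ((i : Int), (x : Int))
    else aInner seq i r (x + 1)

-- outer `for i in range(len(seq))`; falls through to `return len(seq), guess` (guess = 0)
def aOuter (seq : List Int) : Nat → Nat → Int × Int
  | 0, _ => ((seq.length : Int), 0)
  | r + 1, i =>
    match aInner seq i (seq.length / 2 - 2) 2 with
    | some p => p
    | none => aOuter seq r (i + 1)

def find_repeating_sequence (seq : List Int) : Int × Int :=
  aOuter seq seq.length 0

-- ===== PORT B =====
-- backward pass for one gap g: Python appends to `rev` and reverses at the end;
-- here the same values are cons-accumulated (r = remaining iterations, current index = r - 1).
-- all indices are in range in Python, so getD is exact.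
def rowLoop (seq : List Int) (g : Nat) : Nat → List Nat → List Nat
  | 0, acc => acc
  | r + 1, acc =>
    rowLoop seq g r
      ((if seq.getD r 0 = seq.getD (r + g) 0 then acc.headD 0 + 1 else 0) :: acc)

-- `for g in range(2, max_len): diags.append(row)` as a map over the range (g = t + 2)
def bDiags (seq : List Int) : List (List Nat) :=
  (List.range (seq.length / 2 - 2)).map (fun t => rowLoop seq (t + 2) (seq.length - (t + 2)) [0])

def bInner (seq : List Int) (diags : List (List Nat)) (i : Nat) : Nat → Nat → Option (Int × Int)
  | 0, _ => none
  | r + 1, x =>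
    if i + 2 * x ≤ seq.length ∧ x ≤ (diags.getD (x - 2) []).getD i 0 then
      some ((i : Int), (x : Int))
    else bInner seq diags i r (x + 1)

def bOuter (seq : List Int) (diags : List (List Nat)) : Nat → Nat → Int × Int
  | 0, _ => ((seq.length : Int), 0)
  | r + 1, i =>
    match bInner seq diags i (seq.length / 2 - 2) 2 with
    | some p => p
    | none => bOuter seq diags r (i + 1)

def find_repeating_sequence_alt (seq : List Int) : Int × Int :=
  bOuter seq (bDiags seq) seq.length 0

-- ===== PRECONDITION & SPEC =====
def Spec_find_repeating_sequence (seq : List Int) (out : Int × Int) : Prop := out = find_repeating_sequence_alt seq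
instance (seq : List Int) (out : Int × Int) : Decidable (Spec_find_repeating_sequence seq out) := by unfold Spec_find_repeating_sequence; infer_instance

-- ===== CLAIM (what is proved, stated in full; the proofs are below) =====
def Claim_equal_find_repeating_sequence : Prop := ∀ (seq : List Int), Dom_find_repeating_sequence seq → Spec_find_repeating_sequence seq (find_repeating_sequence seq)

-- ===== LEMMAS AND PROOFS =====

-- specification of the diagonal run length lcp(i, i+g), bounded by m = n - g
def vrun (seq : List Int) (g m : Nat) (i : Nat) : Nat :=
  if _h : i < m then
    (if seq.getD i 0 = seq.getD (i + g) 0 then vrun seq g m (i + 1) + 1 else 0)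
  else 0
termination_by m - i

lemma rowLoop_eq (seq : List Int) (g m : Nat) :
    ∀ (r : Nat) (acc : List Nat), r ≤ m → acc.headD 0 = vrun seq g m r →
      rowLoop seq g r acc = (List.range r).map (vrun seq g m) ++ acc := by
  intro r
  induction r with
  | zero => intro acc _ _; simp [rowLoop]
  | succ r ih =>
    intro acc hrm hacc
    have hr : r < m := by omega
    have hv : (if seq.getD r 0 = seq.getD (r + g) 0 then acc.headD 0 + 1 else 0)
        = vrun seq g m r := by
      rw [vrun, dif_pos hr, hacc]
    rw [rowLoop, hv, ih _ (by omega) (by simp), List.range_succ, List.map_append]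
    simp

lemma rowLoop_getD (seq : List Int) (g m i : Nat) (hi : i < m) :
    (rowLoop seq g m [0]).getD i 0 = vrun seq g m i := by
  rw [rowLoop_eq seq g m m [0] le_rfl (by simp [vrun])]
  rw [List.getD_eq_getElem?_getD, List.getElem?_append_left (by simpa using hi)]
  simp [hi]

lemma vrun_ge_iff (seq : List Int) (g m : Nat) :
    ∀ (x i : Nat), i + x ≤ m →
      (x ≤ vrun seq g m i ↔ ∀ k < x, seq.getD (i + k) 0 = seq.getD (i + k + g) 0) := by
  intro x
  induction x with
  | zero => intro i _; simp
  | succ x ih =>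
    intro i him
    have hi : i < m := by omega
    rw [vrun, dif_pos hi]
    by_cases heq : seq.getD i 0 = seq.getD (i + g) 0
    · rw [if_pos heq]
      constructor
      · intro h k hk
        cases k with
        | zero => simpa using heq
        | succ k' =>
          have := (ih (i + 1) (by omega)).mp (by omega) k' (by omega)
          have e1 : i + (k' + 1) = i + 1 + k' := by omega
          rw [e1]
          exact this
      · intro h
        have : x ≤ vrun seq g m (i + 1) := by
          rw [ih (i + 1) (by omega)]
          intro k hk
          have := h (k + 1) (by omega)
          have e1 : i + (k + 1) = i + 1 + k := by omega
          rw [e1] at this; exact this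
        omega
    · rw [if_neg heq]
      constructor
      · omega
      · intro h
        exact absurd (by simpa using h 0 (by omega)) heq

-- A's slice condition characterised: equal iff both blocks fit and match pointwise
lemma sliceCond_iff (seq : List Int) (i x : Nat) (hi : i < seq.length) (hx : 1 ≤ x) :
    (PySem.List.slice seq (some ((0 + i : Nat) : Int)) (some ((x + i : Nat) : Int)) =
     PySem.List.slice seq (some ((x + i : Nat) : Int)) (some ((2 * x + i : Nat) : Int)))
    ↔ (i + 2 * x ≤ seq.length ∧
       ∀ k < x, seq.getD (i + k) 0 = seq.getD (i + k + x) 0) := by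
  set n := seq.length with hn
  rw [PySem.List.slice_natCast, PySem.List.slice_natCast]
  simp only [Nat.zero_add]
  have e1 : x + i - i = x := by omega
  have e2 : 2 * x + i - (x + i) = x := by omega
  rw [e1, e2]
  have hlen1 : ((seq.drop i).take x).length = min x (n - i) := by
    simp [hn]
  have hlen2 : ((seq.drop (x + i)).take x).length = min x (n - (x + i)) := by
    simp [hn]
  constructor
  · intro h
    have hl : min x (n - i) = min x (n - (x + i)) := by
      rw [← hlen1, ← hlen2, h]
    have hfit : i + 2 * x ≤ n := by omega
    refine ⟨hfit, ?_⟩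
    intro k hk
    have h1 : ((seq.drop i).take x)[k]'(by omega) = seq[i + k]'(by omega) := by
      simp [Nat.add_comm i k]
    have h2 : ((seq.drop (x + i)).take x)[k]'(by omega) = seq[i + k + x]'(by omega) := by
      simp [show x + i + k = i + k + x by omega]
    have := List.getElem_of_eq h (by omega : k < ((seq.drop i).take x).length)
    rw [h1] at this
    rw [h2] at this
    rw [List.getD_eq_getElem seq 0 (by omega), List.getD_eq_getElem seq 0 (by omega)]
    exact this
  · rintro ⟨hfit, hpt⟩
    apply List.ext_getElem
    · omega
    · intro k hk1 hk2
      have hkx : k < x := by omega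
      have h1 : ((seq.drop i).take x)[k]'hk1 = seq[i + k]'(by omega) := by
        simp [Nat.add_comm i k]
      have h2 : ((seq.drop (x + i)).take x)[k]'hk2 = seq[i + k + x]'(by omega) := by
        simp [show x + i + k = i + k + x by omega]
      rw [h1, h2]
      have := hpt k hkx
      rw [List.getD_eq_getElem seq 0 (by omega), List.getD_eq_getElem seq 0 (by omega)] at this
      exact this

-- B's table condition characterised the same way
lemma bCond_iff (seq : List Int) (i x : Nat) (hx2 : 2 ≤ x) (hxm : x < seq.length / 2) :
    (i + 2 * x ≤ seq.length ∧ x ≤ ((bDiags seq).getD (x - 2) []).getD i 0)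
    ↔ (i + 2 * x ≤ seq.length ∧
       ∀ k < x, seq.getD (i + k) 0 = seq.getD (i + k + x) 0) := by
  set n := seq.length with hn
  constructor
  · rintro ⟨hfit, h⟩
    refine ⟨hfit, ?_⟩
    have hd : (bDiags seq).getD (x - 2) [] = rowLoop seq x (n - x) [0] := by
      rw [bDiags, List.getD_eq_getElem?_getD, List.getElem?_map,
        List.getElem?_range (by omega : x - 2 < n / 2 - 2)]
      simp [show x - 2 + 2 = x by omega, hn]
    rw [hd, rowLoop_getD seq x (n - x) i (by omega)] at h
    intro k hk
    have := (vrun_ge_iff seq x (n - x) x i (by omega)).mp h k hk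
    exact this
  · rintro ⟨hfit, hpt⟩
    refine ⟨hfit, ?_⟩
    have hd : (bDiags seq).getD (x - 2) [] = rowLoop seq x (n - x) [0] := by
      rw [bDiags, List.getD_eq_getElem?_getD, List.getElem?_map,
        List.getElem?_range (by omega : x - 2 < n / 2 - 2)]
      simp [show x - 2 + 2 = x by omega, hn]
    rw [hd, rowLoop_getD seq x (n - x) i (by omega)]
    exact (vrun_ge_iff seq x (n - x) x i (by omega)).mpr hpt

lemma inner_eq (seq : List Int) (i : Nat) (hi : i < seq.length) :
    ∀ (r x : Nat), 2 ≤ x → r ≤ seq.length / 2 - x →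
      aInner seq i r x = bInner seq (bDiags seq) i r x := by
  intro r
  induction r with
  | zero => intro x _ _; rfl
  | succ r ih =>
    intro x hx2 hr
    have hxm : x < seq.length / 2 := by omega
    have hiff :
        (PySem.List.slice seq (some ((0 + i : Nat) : Int)) (some ((x + i : Nat) : Int)) =
         PySem.List.slice seq (some ((x + i : Nat) : Int)) (some ((2 * x + i : Nat) : Int)))
        ↔ (i + 2 * x ≤ seq.length ∧ x ≤ ((bDiags seq).getD (x - 2) []).getD i 0) := by
      rw [sliceCond_iff seq i x hi (by omega), bCond_iff seq i x hx2 hxm]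
    rw [aInner, bInner]
    by_cases h : PySem.List.slice seq (some ((0 + i : Nat) : Int)) (some ((x + i : Nat) : Int)) =
         PySem.List.slice seq (some ((x + i : Nat) : Int)) (some ((2 * x + i : Nat) : Int))
    · rw [if_pos h, if_pos (hiff.mp h)]
    · rw [if_neg h, if_neg (fun hc => h (hiff.mpr hc))]
      exact ih (x + 1) (by omega) (by omega)

lemma outer_eq (seq : List Int) :
    ∀ (r i : Nat), i + r = seq.length →
      aOuter seq r i = bOuter seq (bDiags seq) r i := by
  intro r
  induction r with
  | zero => intro i _; rfl
  | succ r ih =>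
    intro i hir
    rw [aOuter, bOuter,
      inner_eq seq i (by omega) (seq.length / 2 - 2) 2 le_rfl le_rfl]
    cases bInner seq (bDiags seq) i (seq.length / 2 - 2) 2 with
    | some p => rfl
    | none => exact ih (i + 1) (by omega)

-- ===== VERDICT (by name: the statement is the Claim_ definition above) =====
theorem find_repeating_sequence_spec : Claim_equal_find_repeating_sequence := by
  intro seq _
  unfold Spec_find_repeating_sequence find_repeating_sequence find_repeating_sequence_alt
  exact outer_eq seq seq.length 0 (by omega)
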